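-- pv_equiv track=rewrite | github.com/slavakargin/meandric-systems | src/meandric/core.py | _pairing_to_dyck
-- ===== SOURCE A (Python) =====
-- def _step_to_label(i: int, n2: int) -> int:
--     return (i + 1) % n2
--
-- def _label_to_step(label: int, n2: int) -> int:
--     return (label - 1) % n2
--
-- def _pairing_to_dyck(pairs: list[tuple[int, int]], n: int) -> list[str]:
--     """Reconstruct a Dyck path of length 2n from a noncrossing pairing."""
--     n2 = 2 * n
--     partner: dict[int, int] = {}
--     for a, b in pairs:
--         partner[a] = b
--         partner[b] = a
--     path: list[str] = []
--     for i in range(n2):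
--         label = _step_to_label(i, n2)
--         partner_step = _label_to_step(partner[label], n2)
--         path.append('U' if i < partner_step else 'D')
--     return path
-- ===== SOURCE B (Python) =====
-- def _pairing_to_dyck(pairs: list[tuple[int, int]], n: int) -> list[str]:
--     """Reconstruct a Dyck path of length 2n from a noncrossing pairing."""
--     n2 = 2 * n
--     if n2 <= 0:
--         return []
--     step: dict[int, str] = {}
--     for a, b in pairs:
--         sa = (a - 1) % n2
--         sb = (b - 1) % n2
--         step[min(sa, sb)] = 'U'
--         step[max(sa, sb)] = 'D'
--     return [step[i] for i in range(n2)]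
-- ===== Notes on version B (the rewrite author's own statement) =====
-- stated objective: simpler
-- what changed: Instead of building a label-keyed partner dictionary and then, for every position, converting position to label, looking up the partner and comparing positions, B computes both step positions of each pair directly, records 'U' at the smaller and 'D' at the larger in one pass, and reads the path off by position.
-- outside the precondition, e.g. on _pairing_to_dyck([(0, 1), (3, 3)], 1): A returns ['U', 'D'], B returns ['D', 'D']
import Mathlib
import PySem

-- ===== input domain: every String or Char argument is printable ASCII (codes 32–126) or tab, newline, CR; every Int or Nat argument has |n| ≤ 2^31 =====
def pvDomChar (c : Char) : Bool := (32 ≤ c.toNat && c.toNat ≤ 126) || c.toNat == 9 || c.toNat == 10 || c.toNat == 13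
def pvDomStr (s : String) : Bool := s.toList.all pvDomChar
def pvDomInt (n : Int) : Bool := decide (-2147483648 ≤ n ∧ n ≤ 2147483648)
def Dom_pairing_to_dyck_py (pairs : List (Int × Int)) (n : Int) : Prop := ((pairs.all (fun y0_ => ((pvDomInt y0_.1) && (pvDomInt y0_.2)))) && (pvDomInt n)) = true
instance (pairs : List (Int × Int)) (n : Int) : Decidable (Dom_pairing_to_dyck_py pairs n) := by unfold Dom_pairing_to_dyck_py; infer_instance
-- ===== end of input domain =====

-- B replaces A's label-keyed partner dictionary and per-position label/partner/step
-- conversions by one pass over the pairs recording 'U'/'D' directly by step position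
-- (objective: simpler).

-- ===== PORT A =====
def step_to_label_py (i n2 : Int) : Int := PySem.Int.mod (i + 1) n2

def label_to_step_py (label n2 : Int) : Int := PySem.Int.mod (label - 1) n2

def pairing_to_dyck_py (pairs : List (Int × Int)) (n : Int) : List String :=
  let n2 := 2 * n
  let partner : PySem.Dict Int Int :=
    pairs.foldl (fun d p => (d.insert p.1 p.2).insert p.2 p.1) PySem.Dict.empty
  -- partner[label]: inside Pre_ the key is always present, so getD is exact here
  (PySem.List.pyRange 0 n2 1).foldl (fun path i =>
    let label := step_to_label_py i n2
    let partner_step := label_to_step_py (partner.getD label 0) n2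
    path ++ [if i < partner_step then "U" else "D"]) []


-- ===== PORT B =====
def pairing_to_dyck_py_alt (pairs : List (Int × Int)) (n : Int) : List String :=
  let n2 := 2 * n
  if n2 ≤ 0 then []
  else
    let step : PySem.Dict Int String :=
      pairs.foldl (fun d p =>
        let sa := PySem.Int.mod (p.1 - 1) n2
        let sb := PySem.Int.mod (p.2 - 1) n2
        (d.insert (min sa sb) "U").insert (max sa sb) "D") PySem.Dict.empty
    -- step[i]: inside Pre_ every position 0 ≤ i < n2 is a key, so getD is exact here
    (PySem.List.pyRange 0 n2 1).map (fun i => step.getD i "")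

-- ===== PRECONDITION & SPEC =====
-- Pre_ admits every n ≤ 0 (A returns [] regardless of pairs) and, for n > 0, exactly the
-- complete pairings: n pairs whose endpoints are distinct values in {0,…,2n−1} (hence list
-- each label exactly once).  It excludes incomplete pairings (A raises KeyError there) and
-- pairings with duplicate or extra endpoints, on which A's dict last-write-wins value is
-- accidental.
def Pre_pairing_to_dyck_py (pairs : List (Int × Int)) (n : Int) : Prop :=
  n ≤ 0 ∨
    ((pairs.length : Int) = n ∧
     (pairs.flatMap (fun p => [p.1, p.2])).Nodup ∧
     ∀ p ∈ pairs, (0 ≤ p.1 ∧ p.1 < 2 * n) ∧ (0 ≤ p.2 ∧ p.2 < 2 * n))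

instance (pairs : List (Int × Int)) (n : Int) : Decidable (Pre_pairing_to_dyck_py pairs n) := by
  unfold Pre_pairing_to_dyck_py; infer_instance

def pvWitness_pairing_to_dyck_py : (List (Int × Int)) × Int := ([(1, 2), (0, 3)], 2)

def Spec_pairing_to_dyck_py (pairs : List (Int × Int)) (n : Int) (out : List String) : Prop := out = pairing_to_dyck_py_alt pairs n
instance (pairs : List (Int × Int)) (n : Int) (out : List String) : Decidable (Spec_pairing_to_dyck_py pairs n out) := by unfold Spec_pairing_to_dyck_py; infer_instance

-- ===== CLAIM (what is proved, stated in full; the proofs are below) =====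
def Claim_equal_pairing_to_dyck_py : Prop := ∀ (pairs : List (Int × Int)) (n : Int), Dom_pairing_to_dyck_py pairs n → Pre_pairing_to_dyck_py pairs n → Spec_pairing_to_dyck_py pairs n (pairing_to_dyck_py pairs n)

-- ===== LEMMAS AND PROOFS =====

theorem pv_foldl_app (l : List Int) (f : Int → String) (init : List String) :
    l.foldl (fun path i => path ++ [f i]) init = init ++ l.map f := by
  induction l generalizing init with
  | nil => simp
  | cons a t ih => simp [List.foldl, ih]

-- A's partner dict: lookups are unaffected by pairs that do not mention the key
theorem pv_getD_foldl_partner_skip (ps : List (Int × Int)) (d : PySem.Dict Int Int) (x : Int)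
    (h : ∀ q ∈ ps, q.1 ≠ x ∧ q.2 ≠ x) :
    (ps.foldl (fun d p => (d.insert p.1 p.2).insert p.2 p.1) d).getD x 0 = d.getD x 0 := by
  induction ps generalizing d with
  | nil => rfl
  | cons a t ih =>
    rw [List.foldl_cons, ih _ (fun q hq => h q (List.mem_cons_of_mem a hq))]
    have ha := h a (List.mem_cons_self ..)
    rw [PySem.Dict.getD_insert, PySem.Dict.getD_insert]
    simp [Ne.symm ha.1, Ne.symm ha.2]

-- A's partner dict maps each endpoint of a pair to the other endpoint
theorem pv_partner_getD (ps : List (Int × Int)) (d : PySem.Dict Int Int)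
    (hnd : (ps.flatMap fun p => [p.1, p.2]).Nodup) :
    ∀ p ∈ ps, (ps.foldl (fun d p => (d.insert p.1 p.2).insert p.2 p.1) d).getD p.1 0 = p.2 ∧
      (ps.foldl (fun d p => (d.insert p.1 p.2).insert p.2 p.1) d).getD p.2 0 = p.1 := by
  induction ps generalizing d with
  | nil => intro p hp; simp at hp
  | cons a t ih =>
    simp only [List.flatMap_cons, List.nodup_append] at hnd
    obtain ⟨hab, hndt, hdisj⟩ := hnd
    have hane : a.1 ≠ a.2 := by simpa using hab
    intro p hp
    rcases List.mem_cons.mp hp with rfl | hpt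
    · have h1 : p.1 ∉ t.flatMap fun p => [p.1, p.2] := fun hm => hdisj p.1 (by simp) p.1 hm rfl
      have h2 : p.2 ∉ t.flatMap fun p => [p.1, p.2] := fun hm => hdisj p.2 (by simp) p.2 hm rfl
      have hnotin : ∀ q ∈ t, q.1 ≠ p.1 ∧ q.2 ≠ p.1 := by
        intro q hq
        constructor <;> intro hc <;> exact h1 (List.mem_flatMap.mpr ⟨q, hq, by simp [hc]⟩)
      have hnotin2 : ∀ q ∈ t, q.1 ≠ p.2 ∧ q.2 ≠ p.2 := by
        intro q hq
        constructor <;> intro hc <;> exact h2 (List.mem_flatMap.mpr ⟨q, hq, by simp [hc]⟩)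
      rw [List.foldl_cons]
      constructor
      · rw [pv_getD_foldl_partner_skip _ _ _ hnotin, PySem.Dict.getD_insert, PySem.Dict.getD_insert]
        simp [hane]
      · rw [pv_getD_foldl_partner_skip _ _ _ hnotin2, PySem.Dict.getD_insert]
        simp
    · exact ih _ hndt p hpt

theorem pv_pm_step (x n2 : Int) (h0 : 0 ≤ x) (h1 : x < n2) :
    PySem.Int.mod (x - 1) n2 = if x = 0 then n2 - 1 else x - 1 := by
  rw [PySem.Int.mod_eq_emod_of_pos (by omega)]
  split
  · next hx =>
    subst hx
    have h2 : (0 - 1 : Int) = (n2 - 1) + n2 * (-1) := by ring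
    rw [h2, Int.add_mul_emod_self_left]
    exact Int.emod_eq_of_lt (by omega) (by omega)
  · exact Int.emod_eq_of_lt (by omega) (by omega)

theorem pv_step_inj (x y n2 : Int) (hx0 : 0 ≤ x) (hx1 : x < n2) (hy0 : 0 ≤ y) (hy1 : y < n2)
    (h : PySem.Int.mod (x - 1) n2 = PySem.Int.mod (y - 1) n2) : x = y := by
  rw [pv_pm_step x n2 hx0 hx1, pv_pm_step y n2 hy0 hy1] at h
  split at h <;> split at h <;> omega

theorem pv_step_label (j n2 : Int) (h0 : 0 ≤ j) (h1 : j < n2) :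
    label_to_step_py (step_to_label_py j n2) n2 = j := by
  unfold step_to_label_py label_to_step_py
  rw [PySem.Int.mod_eq_emod_of_pos (h := by omega) (a := j + 1)]
  by_cases hj : j = n2 - 1
  · subst hj
    have h2 : (n2 - 1 + 1) % n2 = 0 := by simp
    rw [h2, pv_pm_step 0 n2 (by omega) (by omega)]
    simp
  · rw [Int.emod_eq_of_lt (by omega) (by omega), pv_pm_step (j + 1) n2 (by omega) (by omega)]
    simp only [if_neg (by omega : ¬ j + 1 = 0)]
    omega

theorem pv_label_bounds (j n2 : Int) (hpos : 0 < n2) :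
    0 ≤ step_to_label_py j n2 ∧ step_to_label_py j n2 < n2 := by
  unfold step_to_label_py
  rw [PySem.Int.mod_eq_emod_of_pos hpos]
  exact ⟨Int.emod_nonneg _ (by omega), Int.emod_lt_of_pos _ hpos⟩

theorem pv_pair_ne (ps : List (Int × Int))
    (hnd : (ps.flatMap fun p => [p.1, p.2]).Nodup) : ∀ p ∈ ps, p.1 ≠ p.2 := by
  induction ps with
  | nil => intro p hp; simp at hp
  | cons a t ih =>
    simp only [List.flatMap_cons, List.nodup_append] at hnd
    intro p hp
    rcases List.mem_cons.mp hp with rfl | hpt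
    · simpa using hnd.1
    · exact ih hnd.2.1 p hpt

-- B's step dict: lookups are unaffected by pairs neither of whose steps is the key
theorem pv_step_skip (ps : List (Int × Int)) (n2 : Int) (d : PySem.Dict Int String) (x : Int)
    (h : ∀ q ∈ ps, min (PySem.Int.mod (q.1 - 1) n2) (PySem.Int.mod (q.2 - 1) n2) ≠ x ∧
      max (PySem.Int.mod (q.1 - 1) n2) (PySem.Int.mod (q.2 - 1) n2) ≠ x) :
    (ps.foldl (fun d p => (d.insert (min (PySem.Int.mod (p.1 - 1) n2) (PySem.Int.mod (p.2 - 1) n2)) "U").insert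
      (max (PySem.Int.mod (p.1 - 1) n2) (PySem.Int.mod (p.2 - 1) n2)) "D") d).getD x "" = d.getD x "" := by
  induction ps generalizing d with
  | nil => rfl
  | cons a t ih =>
    rw [List.foldl_cons, ih _ (fun q hq => h q (List.mem_cons_of_mem a hq))]
    have ha := h a (List.mem_cons_self ..)
    rw [PySem.Dict.getD_insert, PySem.Dict.getD_insert]
    simp [Ne.symm ha.1, Ne.symm ha.2]

-- B's step dict holds 'U' at the smaller and 'D' at the larger step of every pair
theorem pv_step_getD (ps : List (Int × Int)) (n2 : Int) (d : PySem.Dict Int String)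
    (hnd : (ps.flatMap fun p => [p.1, p.2]).Nodup)
    (hbnd : ∀ q ∈ ps, (0 ≤ q.1 ∧ q.1 < n2) ∧ (0 ≤ q.2 ∧ q.2 < n2)) :
    ∀ p ∈ ps,
      (ps.foldl (fun d p => (d.insert (min (PySem.Int.mod (p.1 - 1) n2) (PySem.Int.mod (p.2 - 1) n2)) "U").insert
        (max (PySem.Int.mod (p.1 - 1) n2) (PySem.Int.mod (p.2 - 1) n2)) "D") d).getD
        (min (PySem.Int.mod (p.1 - 1) n2) (PySem.Int.mod (p.2 - 1) n2)) "" = "U" ∧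
      (ps.foldl (fun d p => (d.insert (min (PySem.Int.mod (p.1 - 1) n2) (PySem.Int.mod (p.2 - 1) n2)) "U").insert
        (max (PySem.Int.mod (p.1 - 1) n2) (PySem.Int.mod (p.2 - 1) n2)) "D") d).getD
        (max (PySem.Int.mod (p.1 - 1) n2) (PySem.Int.mod (p.2 - 1) n2)) "" = "D" := by
  induction ps generalizing d with
  | nil => intro p hp; simp at hp
  | cons a t ih =>
    have hndc := hnd
    simp only [List.flatMap_cons, List.nodup_append] at hndc
    obtain ⟨hab, hndt, hdisj⟩ := hndc
    intro p hp
    rcases List.mem_cons.mp hp with rfl | hpt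
    · have hane : p.1 ≠ p.2 := by simpa using hab
      obtain ⟨⟨hp10, hp11⟩, ⟨hp20, hp21⟩⟩ := hbnd p (List.mem_cons_self ..)
      have hsne : PySem.Int.mod (p.1 - 1) n2 ≠ PySem.Int.mod (p.2 - 1) n2 :=
        fun hc => hane (pv_step_inj p.1 p.2 n2 hp10 hp11 hp20 hp21 hc)
      have h1 : p.1 ∉ t.flatMap fun p => [p.1, p.2] := fun hm => hdisj p.1 (by simp) p.1 hm rfl
      have h2 : p.2 ∉ t.flatMap fun p => [p.1, p.2] := fun hm => hdisj p.2 (by simp) p.2 hm rfl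
      have hstep : ∀ q ∈ t, ∀ y : Int,
          (y = PySem.Int.mod (p.1 - 1) n2 ∨ y = PySem.Int.mod (p.2 - 1) n2) →
          min (PySem.Int.mod (q.1 - 1) n2) (PySem.Int.mod (q.2 - 1) n2) ≠ y ∧
          max (PySem.Int.mod (q.1 - 1) n2) (PySem.Int.mod (q.2 - 1) n2) ≠ y := by
        intro q hq y hy
        obtain ⟨⟨hq10, hq11⟩, ⟨hq20, hq21⟩⟩ := hbnd q (List.mem_cons_of_mem p hq)
        have hq1 : PySem.Int.mod (q.1 - 1) n2 ≠ y := by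
          rcases hy with rfl | rfl
          · exact fun hc => h1 (List.mem_flatMap.mpr ⟨q, hq,
              by simp [(pv_step_inj q.1 p.1 n2 hq10 hq11 hp10 hp11 hc).symm]⟩)
          · exact fun hc => h2 (List.mem_flatMap.mpr ⟨q, hq,
              by simp [(pv_step_inj q.1 p.2 n2 hq10 hq11 hp20 hp21 hc).symm]⟩)
        have hq2 : PySem.Int.mod (q.2 - 1) n2 ≠ y := by
          rcases hy with rfl | rfl
          · exact fun hc => h1 (List.mem_flatMap.mpr ⟨q, hq,
              by simp [(pv_step_inj q.2 p.1 n2 hq20 hq21 hp10 hp11 hc).symm]⟩)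
          · exact fun hc => h2 (List.mem_flatMap.mpr ⟨q, hq,
              by simp [(pv_step_inj q.2 p.2 n2 hq20 hq21 hp20 hp21 hc).symm]⟩)
        constructor <;> intro hc <;> omega
      have hminmax : min (PySem.Int.mod (p.1 - 1) n2) (PySem.Int.mod (p.2 - 1) n2) ≠
          max (PySem.Int.mod (p.1 - 1) n2) (PySem.Int.mod (p.2 - 1) n2) := by omega
      rw [List.foldl_cons]
      constructor
      · rw [pv_step_skip t n2 _ _ (fun q hq => hstep q hq _ (min_choice _ _)),
          PySem.Dict.getD_insert, if_neg hminmax, PySem.Dict.getD_insert, if_pos rfl]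
      · rw [pv_step_skip t n2 _ _ (fun q hq => hstep q hq _ (max_choice _ _)),
          PySem.Dict.getD_insert, if_pos rfl]
    · exact ih _ hndt (fun q hq => hbnd q (List.mem_cons_of_mem a hq)) p hpt

-- the per-position equality of the two computations, for a complete pairing
theorem pv_core2 (pairs : List (Int × Int)) (n2 : Int) (hpos : 0 < n2)
    (hperm : (pairs.flatMap fun p => [p.1, p.2]).Perm
      ((List.range n2.toNat).map (fun k : Nat => (k : Int))))
    (j : Int) (hj0 : 0 ≤ j) (hj : j < n2) :
    (if j < label_to_step_py
        ((pairs.foldl (fun d p => (d.insert p.1 p.2).insert p.2 p.1) PySem.Dict.empty).getD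
          (step_to_label_py j n2) 0) n2 then "U" else "D")
      = (pairs.foldl (fun d p =>
          (d.insert (min (PySem.Int.mod (p.1 - 1) n2) (PySem.Int.mod (p.2 - 1) n2)) "U").insert
            (max (PySem.Int.mod (p.1 - 1) n2) (PySem.Int.mod (p.2 - 1) n2)) "D")
          PySem.Dict.empty).getD j "" := by
  have hmemE : ∀ x, x ∈ (pairs.flatMap fun p => [p.1, p.2]) ↔ 0 ≤ x ∧ x < n2 := by
    intro x
    rw [hperm.mem_iff]
    simp only [List.mem_map]
    constructor
    · rintro ⟨k, hk, rfl⟩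
      rw [List.mem_range] at hk
      omega
    · rintro ⟨h0, h1⟩
      refine ⟨x.toNat, ?_, by omega⟩
      rw [List.mem_range]
      omega
  have hnd : (pairs.flatMap fun p => [p.1, p.2]).Nodup := by
    refine hperm.nodup_iff.mpr (List.Nodup.map ?_ List.nodup_range)
    intro a b h
    simp only [Nat.cast_inj] at h
    exact h
  have hbnd : ∀ q ∈ pairs, (0 ≤ q.1 ∧ q.1 < n2) ∧ (0 ≤ q.2 ∧ q.2 < n2) := fun q hq =>
    ⟨(hmemE _).mp (List.mem_flatMap.mpr ⟨q, hq, by simp⟩),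
     (hmemE _).mp (List.mem_flatMap.mpr ⟨q, hq, by simp⟩)⟩
  have hdict := pv_partner_getD pairs PySem.Dict.empty hnd
  obtain ⟨hl0, hl1⟩ := pv_label_bounds j n2 hpos
  have hstepl : label_to_step_py (step_to_label_py j n2) n2 = j := pv_step_label j n2 hj0 hj
  have hlE := (hmemE _).mpr ⟨hl0, hl1⟩
  rw [List.mem_flatMap] at hlE
  obtain ⟨p, hp, hlp⟩ := hlE
  have hlp' : step_to_label_py j n2 = p.1 ∨ step_to_label_py j n2 = p.2 := by simpa using hlp
  obtain ⟨⟨hp10, hp11⟩, ⟨hp20, hp21⟩⟩ := hbnd p hp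
  have hane : p.1 ≠ p.2 := pv_pair_ne pairs hnd p hp
  have hsg := pv_step_getD pairs n2 PySem.Dict.empty hnd hbnd p hp
  rcases hlp' with hcase | hcase
  · rw [hcase, (hdict p hp).1]
    have hs1 : PySem.Int.mod (p.1 - 1) n2 = j := by
      have hx := hstepl
      rw [hcase] at hx
      simpa [label_to_step_py] using hx
    simp only [label_to_step_py]
    have hs2ne : PySem.Int.mod (p.2 - 1) n2 ≠ j := fun hc =>
      hane (pv_step_inj p.1 p.2 n2 hp10 hp11 hp20 hp21 (hs1.trans hc.symm))
    by_cases hlt : j < PySem.Int.mod (p.2 - 1) n2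
    · rw [if_pos hlt]
      have hmin : min (PySem.Int.mod (p.1 - 1) n2) (PySem.Int.mod (p.2 - 1) n2) = j := by omega
      rw [← hmin, hsg.1]
    · rw [if_neg hlt]
      have hmax : max (PySem.Int.mod (p.1 - 1) n2) (PySem.Int.mod (p.2 - 1) n2) = j := by omega
      rw [← hmax, hsg.2]
  · rw [hcase, (hdict p hp).2]
    have hs2 : PySem.Int.mod (p.2 - 1) n2 = j := by
      have hx := hstepl
      rw [hcase] at hx
      simpa [label_to_step_py] using hx
    simp only [label_to_step_py]
    have hs1ne : PySem.Int.mod (p.1 - 1) n2 ≠ j := fun hc =>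
      hane (pv_step_inj p.1 p.2 n2 hp10 hp11 hp20 hp21 (hc.trans hs2.symm))
    by_cases hlt : j < PySem.Int.mod (p.1 - 1) n2
    · rw [if_pos hlt]
      have hmin : min (PySem.Int.mod (p.1 - 1) n2) (PySem.Int.mod (p.2 - 1) n2) = j := by omega
      rw [← hmin, hsg.1]
    · rw [if_neg hlt]
      have hmax : max (PySem.Int.mod (p.1 - 1) n2) (PySem.Int.mod (p.2 - 1) n2) = j := by omega
      rw [← hmax, hsg.2]

theorem pv_flatMap_len (pairs : List (Int × Int)) :
    (pairs.flatMap fun p => [p.1, p.2]).length = 2 * pairs.length := by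
  induction pairs with
  | nil => rfl
  | cons a t ih =>
    simp only [List.flatMap_cons, List.length_append, List.length_cons, List.length_nil, ih]
    omega

theorem pv_main (pairs : List (Int × Int)) (n : Int) (hpre : Pre_pairing_to_dyck_py pairs n) :
    pairing_to_dyck_py pairs n = pairing_to_dyck_py_alt pairs n := by
  simp only [pairing_to_dyck_py, pairing_to_dyck_py_alt]
  by_cases hn : n ≤ 0
  · rw [PySem.List.pyRange_one_eq_nil (by omega), if_pos (by omega : 2 * n ≤ 0)]
    rfl
  · rcases hpre with h | ⟨hlen, hnd, hrange⟩
    · omega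
    have hpos : (0 : Int) < 2 * n := by omega
    have hperm : (pairs.flatMap fun p => [p.1, p.2]).Perm
        ((List.range (2 * n).toNat).map (fun k : Nat => (k : Int))) := by
      refine (hnd.subperm ?_).perm_of_length_le ?_
      · intro x hx
        rw [List.mem_flatMap] at hx
        obtain ⟨p, hp, hxp⟩ := hx
        have hxor : x = p.1 ∨ x = p.2 := by simpa using hxp
        have hb : 0 ≤ x ∧ x < 2 * n := by
          rcases hxor with rfl | rfl
          · exact (hrange p hp).1
          · exact (hrange p hp).2
        simp only [List.mem_map]
        exact ⟨x.toNat, by rw [List.mem_range]; omega, by omega⟩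
      · rw [List.length_map, List.length_range, pv_flatMap_len]
        omega
    rw [if_neg (by omega : ¬ 2 * n ≤ 0), pv_foldl_app, List.nil_append]
    refine List.map_congr_left ?_
    intro i hi
    rw [PySem.List.mem_pyRange_one] at hi
    exact pv_core2 pairs (2 * n) hpos hperm i hi.1 hi.2

-- ===== VERDICT (by name: the statement is the Claim_ definition above) =====
theorem pairing_to_dyck_py_spec : Claim_equal_pairing_to_dyck_py := by
  intro pairs n _ hpre
  unfold Spec_pairing_to_dyck_py
  exact pv_main pairs n hpre
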